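-- pv_equiv track=rewrite | github.com/darkfeline/vocaran_tools | move_songs.py | make_col
-- ===== SOURCE A (Python) =====
-- def make_col(x, cols, vert=True):
--     """Returns a list with list x split into some number of columns, with
--     entries going vertically (succeeding values in column) or horizontally
--     (succeeding values going across columns)."""
--     if vert:
--         base_height = len(x) // cols
--         extra_height = len(x) % cols
--         y = []
--         a = 0
--         for i in range(cols):
--             b = a + base_height
--             if extra_height > 0:
--                 b += 1
--                 extra_height -= 1
--             y.append(x[a:b])
--             a = b
--     else:
--         y = [x[a:a + cols] for a in range(0, len(x), cols)]  # row-wise, horiz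
--     return y
-- ===== SOURCE B (Python) =====
-- def make_col(x, cols, vert=True):
--     """Returns a list with list x split into some number of columns, with
--     entries going vertically (succeeding values in column) or horizontally
--     (succeeding values going across columns)."""
--     base, rem = divmod(len(x), cols)
--     if vert:
--         lengths = [base + 1] * rem + [base] * (cols - rem)
--     else:
--         lengths = [cols] * base + ([rem] if rem > 0 else [])
--     it = iter(x)
--     return [[next(it) for _ in range(n)] for n in lengths]
-- ===== Notes on version B (the rewrite author's own statement) =====
-- stated objective: alternative
-- what changed: B does no slice-bound arithmetic at all: it first builds a table of chunk lengths (for both the vertical and the horizontal branch), then deals the elements out of a single consuming iterator with next(), whereas A computes index ranges and slices x.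
import Mathlib
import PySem

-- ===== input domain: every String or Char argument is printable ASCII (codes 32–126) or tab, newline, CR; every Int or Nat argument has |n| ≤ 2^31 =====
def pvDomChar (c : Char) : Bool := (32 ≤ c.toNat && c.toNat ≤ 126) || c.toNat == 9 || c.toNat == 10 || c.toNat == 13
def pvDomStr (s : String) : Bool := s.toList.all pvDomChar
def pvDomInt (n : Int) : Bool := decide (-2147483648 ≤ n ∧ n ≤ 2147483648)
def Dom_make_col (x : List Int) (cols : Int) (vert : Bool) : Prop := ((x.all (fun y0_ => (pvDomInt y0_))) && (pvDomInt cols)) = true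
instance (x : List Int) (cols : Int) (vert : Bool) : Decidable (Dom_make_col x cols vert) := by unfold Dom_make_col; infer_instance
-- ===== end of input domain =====

-- B replaces A's slice arithmetic entirely: it first builds a table of column
-- lengths, then deals the elements out of one consuming iterator
-- (objective: alternative decomposition, same cost).

-- ===== PORT A =====
-- loop body of A's `for i in range(cols)`: state = (y, a, extra_height)
def pvAStep (x : List Int) (base : Int) (s : List (List Int) × Int × Int) (_i : Int) :
    List (List Int) × Int × Int :=
  let b := s.2.1 + base
  if s.2.2 > 0 then
    (s.1 ++ [PySem.List.slice x (some s.2.1) (some (b + 1))], b + 1, s.2.2 - 1)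
  else
    (s.1 ++ [PySem.List.slice x (some s.2.1) (some b)], b, s.2.2)

def make_col (x : List Int) (cols : Int) (vert : Bool) : List (List Int) :=
  if vert then
    let base := PySem.Int.floordiv (x.length : Int) cols
    let extra := PySem.Int.mod (x.length : Int) cols
    ((PySem.List.pyRange 0 cols 1).foldl (pvAStep x base) ([], 0, extra)).1
  else
    (PySem.List.pyRange 0 (x.length : Int) cols).map
      (fun a => PySem.List.slice x (some a) (some (a + cols)))

-- ===== PORT B =====
-- one column of B's outer comprehension: take the next n items off the iterator
-- (state = (columns so far, items not yet consumed)); `[next(it) for _ in range(n)]`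
-- consumes exactly max(n,0) = n.toNat items
def pvBStep (s : List (List Int) × List Int) (n : Int) : List (List Int) × List Int :=
  (s.1 ++ [s.2.take n.toNat], s.2.drop n.toNat)

def make_col_alt (x : List Int) (cols : Int) (vert : Bool) : List (List Int) :=
  let base := PySem.Int.floordiv (x.length : Int) cols
  let rem := PySem.Int.mod (x.length : Int) cols
  let lengths :=
    if vert then
      List.replicate rem.toNat (base + 1) ++ List.replicate (cols - rem).toNat base
    else
      List.replicate base.toNat cols ++ (if rem > 0 then [rem] else [])
  (lengths.foldl pvBStep ([], x)).1

-- ===== PRECONDITION & SPEC =====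
-- cols = 0 makes both Pythons raise (A: ZeroDivisionError vertically, ValueError
-- from range(..., 0) horizontally; B: ZeroDivisionError from divmod).
def Pre_make_col (x : List Int) (cols : Int) (vert : Bool) : Prop := cols ≠ 0
instance (x : List Int) (cols : Int) (vert : Bool) : Decidable (Pre_make_col x cols vert) := by unfold Pre_make_col; infer_instance
def pvWitness_make_col : List Int × Int × Bool := ([1, 2, 3, 4, 5], 3, true)

def Spec_make_col (x : List Int) (cols : Int) (vert : Bool) (out : List (List Int)) : Prop := out = make_col_alt x cols vert
instance (x : List Int) (cols : Int) (vert : Bool) (out : List (List Int)) : Decidable (Spec_make_col x cols vert out) := by unfold Spec_make_col; infer_instance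

-- ===== CLAIM (what is proved, stated in full; the proofs are below) =====
def Claim_equal_make_col : Prop := ∀ (x : List Int) (cols : Int) (vert : Bool), Dom_make_col x cols vert → Pre_make_col x cols vert → Spec_make_col x cols vert (make_col x cols vert)

-- ===== LEMMAS AND PROOFS =====

-- what B's fold computes: successive take/drop by the length table
def pvChunks (lengths : List Int) (rest : List Int) : List (List Int) :=
  match lengths with
  | [] => []
  | n :: ns => rest.take n.toNat :: pvChunks ns (rest.drop n.toNat)

lemma pvBfold (L : List Int) :
    ∀ (y : List (List Int)) (rest : List Int),
    (L.foldl pvBStep (y, rest)).1 = y ++ pvChunks L rest := by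
  induction L with
  | nil => intro y rest; simp [pvChunks]
  | cons n ns ih => intro y rest; simp [pvBStep, pvChunks, ih]

-- A's vertical loop, from a generic state: offset a, e extras left, m columns left
lemma pvVertLoop (x : List Int) (base : Int) (hb : 0 ≤ base) :
    ∀ (m : Nat) (k cols : Int), 0 ≤ k → cols - k = (m : Int) →
    ∀ (y : List (List Int)) (a e : Int), 0 ≤ a → 0 ≤ e →
    ((PySem.List.pyRange k cols 1).foldl (pvAStep x base) (y, a, e)).1
      = y ++ pvChunks
          (List.replicate (min e.toNat m) (base + 1) ++ List.replicate (m - min e.toNat m) base)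
          (x.drop a.toNat) := by
  intro m
  induction m with
  | zero =>
    intro k cols hk hm y a e ha he
    rw [PySem.List.pyRange_one_eq_nil (by omega)]
    simp [pvChunks]
  | succ m ih =>
    intro k cols hk hm y a e ha he
    rw [PySem.List.pyRange_one_cons (by omega)]
    simp only [List.foldl_cons]
    by_cases hpos : e > 0
    · rw [show pvAStep x base (y, a, e) k
          = (y ++ [PySem.List.slice x (some a) (some (a + base + 1))], a + base + 1, e - 1) from by
            simp [pvAStep, hpos]]
      rw [ih (k + 1) cols (by omega) (by omega) _ (a + base + 1) (e - 1) (by omega) (by omega)]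
      have hrep : List.replicate (min e.toNat (m + 1)) (base + 1) ++
            List.replicate (m + 1 - min e.toNat (m + 1)) base
          = (base + 1) :: (List.replicate (min (e - 1).toNat m) (base + 1) ++
              List.replicate (m - min (e - 1).toNat m) base) := by
        have h1 : min e.toNat (m + 1) = min (e - 1).toNat m + 1 := by omega
        rw [h1]
        have h2 : m + 1 - (min (e - 1).toNat m + 1) = m - min (e - 1).toNat m := by omega
        rw [h2, List.replicate_succ, List.cons_append]
      rw [hrep]
      simp only [pvChunks, List.append_assoc, List.singleton_append]
      rw [PySem.List.slice_toNat x ha (by omega), List.drop_drop,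
          show (a + base + 1).toNat - a.toNat = (base + 1).toNat from by omega,
          show a.toNat + (base + 1).toNat = (a + base + 1).toNat from by omega]
    · rw [show pvAStep x base (y, a, e) k
          = (y ++ [PySem.List.slice x (some a) (some (a + base))], a + base, e) from by
            simp [pvAStep, hpos]]
      have he0 : e = 0 := by omega
      rw [ih (k + 1) cols (by omega) (by omega) _ (a + base) e (by omega) he]
      have hrep : List.replicate (min e.toNat (m + 1)) (base + 1) ++
            List.replicate (m + 1 - min e.toNat (m + 1)) base
          = base :: (List.replicate (min e.toNat m) (base + 1) ++
              List.replicate (m - min e.toNat m) base) := by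
        have h1 : min e.toNat (m + 1) = 0 := by omega
        have h2 : min e.toNat m = 0 := by omega
        simp [h1, h2, List.replicate_succ]
      rw [hrep]
      simp only [pvChunks, List.append_assoc, List.singleton_append]
      rw [PySem.List.slice_toNat x ha (by omega), List.drop_drop,
          show (a + base).toNat - a.toNat = base.toNat from by omega,
          show a.toNat + base.toNat = (a + base).toNat from by omega]

-- shift a positive-step range starting at its own step down to 0
lemma pvRangeShift (b s : Int) (hs : 0 < s) :
    PySem.List.pyRange s b s = (PySem.List.pyRange 0 (b - s) s).map (fun a => a + s) := by
  rw [PySem.List.pyRange_of_pos _ _ hs, PySem.List.pyRange_of_pos _ _ hs, List.map_map]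
  have hC : (if s < b then ((b - s + s - 1) / s).toNat else 0)
      = (if 0 < b - s then ((b - s - 0 + s - 1) / s).toNat else 0) := by
    by_cases h : s < b
    · rw [if_pos h, if_pos (by omega)]
      norm_num
    · rw [if_neg h, if_neg (by omega)]
  rw [hC]
  apply List.map_congr_left
  intro k _
  simp
  ring

-- range(0, b, s) with negative step over a nonnegative stop is empty
lemma pvRangeNegEmpty (b s : Int) (hb : 0 ≤ b) (hs : s < 0) :
    PySem.List.pyRange 0 b s = [] := by
  simp only [PySem.List.pyRange, if_neg (show ¬ s = 0 from by omega),
    if_neg (show ¬ (0 : Int) < s from by omega), if_neg (show ¬ b < 0 from by omega)]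
  simp

-- a positive-step range with stop ≤ start is empty
lemma pvRangePosEmpty (a b s : Int) (hs : 0 < s) (hba : b ≤ a) :
    PySem.List.pyRange a b s = [] := by
  rw [PySem.List.pyRange_of_pos _ _ hs, if_neg (by omega)]
  simp

-- peel the first element off a positive-step range starting at 0
lemma pvRangeConsHead (b s : Int) (hs : 0 < s) (hb : 0 < b) :
    PySem.List.pyRange 0 b s = 0 :: PySem.List.pyRange s b s := by
  rw [PySem.List.pyRange_of_pos _ _ hs, PySem.List.pyRange_of_pos _ _ hs, if_pos hb]
  have h1 : (b - 0 + s - 1) / s = (b - s + s - 1) / s + 1 := by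
    rw [show b - 0 + s - 1 = (b - s + s - 1) + 1 * s from by ring,
      Int.add_mul_ediv_right _ _ (by omega)]
  by_cases hsb : s < b
  · rw [if_pos hsb]
    have hnn : 0 ≤ (b - s + s - 1) / s := Int.ediv_nonneg (by omega) (by omega)
    have h2 : ((b - 0 + s - 1) / s).toNat = ((b - s + s - 1) / s).toNat + 1 := by omega
    rw [h2, List.range_succ_eq_map, List.map_cons, List.map_map]
    refine congrArg₂ _ (by ring) ?_
    apply List.map_congr_left
    intro k _
    simp
    ring
  · rw [if_neg hsb]
    have h2 : (b - 0 + s - 1) / s = 1 := by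
      rw [← PySem.Int.floordiv_eq_ediv_of_pos hs, PySem.Int.floordiv_eq_iff_of_pos hs]
      omega
    rw [h2]
    simp

-- A's horizontal comprehension equals the take/drop chunking by B's length table
lemma pvHorizLoop (cols : Int) (hc : 0 < cols) :
    ∀ (q : Nat) (xs : List Int), PySem.Int.floordiv (xs.length : Int) cols = (q : Int) →
    (PySem.List.pyRange 0 (xs.length : Int) cols).map
        (fun a => PySem.List.slice xs (some a) (some (a + cols)))
      = pvChunks
          (List.replicate q cols ++
            (if PySem.Int.mod (xs.length : Int) cols > 0 then [PySem.Int.mod (xs.length : Int) cols] else []))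
          xs := by
  intro q
  induction q with
  | zero =>
    intro xs hq
    have hlt : (xs.length : Int) < cols := by
      rcases (PySem.Int.floordiv_eq_iff_of_pos hc).1 hq with ⟨_, h2⟩
      omega
    have hmod : PySem.Int.mod (xs.length : Int) cols = (xs.length : Int) := by
      have := PySem.Int.floordiv_mul_add_mod (xs.length : Int) cols
      rw [hq] at this
      omega
    rw [hmod]
    by_cases hnil : xs.length = 0
    · rw [if_neg (by omega)]
      rw [show ((xs.length : Int)) = 0 from by omega, pvRangePosEmpty 0 0 cols hc le_rfl]
      simp [pvChunks]
    · rw [if_pos (by omega)]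
      rw [pvRangeConsHead _ _ hc (by omega), pvRangePosEmpty cols _ cols hc (by omega)]
      simp only [List.map_cons, List.map_nil, List.replicate_zero, List.nil_append]
      rw [show (0 : Int) + cols = cols from by ring,
        PySem.List.slice_toNat xs le_rfl (le_of_lt hc)]
      simp only [pvChunks, Int.toNat_zero, Nat.sub_zero, List.drop_zero, Int.toNat_natCast]
      rw [List.take_of_length_le (by omega), List.take_length]
  | succ q ih =>
    intro xs hq
    have hge : cols ≤ (xs.length : Int) := by
      rcases (PySem.Int.floordiv_eq_iff_of_pos hc).1 hq with ⟨h1, _⟩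
      push_cast at h1
      nlinarith [Int.natCast_nonneg q]
    have hlen' : ((xs.drop cols.toNat).length : Int) = (xs.length : Int) - cols := by
      simp [List.length_drop]
      omega
    have hmodeq : PySem.Int.mod ((xs.drop cols.toNat).length : Int) cols
        = PySem.Int.mod (xs.length : Int) cols := by
      rw [PySem.Int.mod_eq_emod_of_pos hc, PySem.Int.mod_eq_emod_of_pos hc, hlen',
        Int.sub_emod_right]
    have hq' : PySem.Int.floordiv ((xs.drop cols.toNat).length : Int) cols = (q : Int) := by
      rw [PySem.Int.floordiv_eq_iff_of_pos hc] at hq ⊢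
      rw [hlen']
      push_cast at hq ⊢
      obtain ⟨h1, h2⟩ := hq
      constructor <;> nlinarith
    have IH := ih (xs.drop cols.toNat) hq'
    rw [hmodeq, hlen'] at IH
    rw [pvRangeConsHead _ _ hc (by omega), pvRangeShift _ _ hc]
    simp only [List.map_cons, List.map_map]
    rw [List.replicate_succ, List.cons_append]
    simp only [pvChunks]
    refine congrArg₂ _ ?_ ?_
    · rw [show (0 : Int) + cols = cols from by ring,
        PySem.List.slice_toNat xs le_rfl (le_of_lt hc)]
      simp
    · rw [← IH]
      apply List.map_congr_left
      intro a ha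
      have ha0 : 0 ≤ a := ((PySem.List.mem_pyRange_iff_of_pos hc a).1 ha).1
      simp only [Function.comp]
      rw [PySem.List.slice_toNat xs (by omega) (by omega),
        PySem.List.slice_toNat (xs.drop cols.toNat) (by omega) (by omega), List.drop_drop,
        show cols.toNat + a.toNat = (a + cols).toNat from by omega,
        show (a + cols + cols).toNat - (a + cols).toNat = (a + cols).toNat - a.toNat from by omega]

-- ===== VERDICT (by name: the statement is the Claim_ definition above) =====
theorem make_col_spec : Claim_equal_make_col := by
  intro x cols vert _ hpre
  unfold Spec_make_col make_col make_col_alt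
  have hlen : (0 : Int) ≤ (x.length : Int) := by positivity
  have hfm := PySem.Int.floordiv_mul_add_mod (x.length : Int) cols
  rcases lt_or_gt_of_ne hpre with hneg | hpos
  · -- cols < 0: both sides are []
    have hmb := PySem.Int.mod_neg_bounds (x.length : Int) hneg
    have hd : PySem.Int.floordiv (x.length : Int) cols ≤ 0 := by nlinarith [hmb.1, hmb.2]
    rw [pvBfold]
    cases vert
    · simp only [Bool.false_eq_true, if_false]
      rw [pvRangeNegEmpty _ _ hlen hneg,
        show (PySem.Int.floordiv (x.length : Int) cols).toNat = 0 from by omega,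
        if_neg (by omega)]
      simp [pvChunks]
    · simp only [if_true]
      rw [PySem.List.pyRange_one_eq_nil (by omega),
        show (PySem.Int.mod (x.length : Int) cols).toNat = 0 from by omega,
        show (cols - PySem.Int.mod (x.length : Int) cols).toNat = 0 from by omega]
      simp [pvChunks]
  · -- cols > 0
    have hb : 0 ≤ PySem.Int.floordiv (x.length : Int) cols := by
      rw [PySem.Int.floordiv_eq_ediv_of_pos hpos]
      exact Int.ediv_nonneg hlen (le_of_lt hpos)
    have he : 0 ≤ PySem.Int.mod (x.length : Int) cols := PySem.Int.mod_nonneg _ hpos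
    have helt : PySem.Int.mod (x.length : Int) cols < cols := PySem.Int.mod_lt _ hpos
    rw [pvBfold]
    cases vert
    · simp only [Bool.false_eq_true, if_false]
      rw [pvHorizLoop cols hpos (PySem.Int.floordiv (x.length : Int) cols).toNat x (by omega)]
      simp
    · simp only [if_true]
      rw [pvVertLoop x _ hb cols.toNat 0 cols le_rfl (by omega) [] 0
          (PySem.Int.mod (x.length : Int) cols) le_rfl he]
      rw [show min (PySem.Int.mod (x.length : Int) cols).toNat cols.toNat
          = (PySem.Int.mod (x.length : Int) cols).toNat from by omega,
        show cols.toNat - (PySem.Int.mod (x.length : Int) cols).toNat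
          = (cols - PySem.Int.mod (x.length : Int) cols).toNat from by omega]
      simp
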